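-- pv_equiv track=rewrite | github.com/adcosta17/somvarg-test | scripts/identify_translocations.py | get_seen_nearby
-- ===== SOURCE A (Python) =====
-- def get_seen_nearby(chrom, start, end, seen):
--     new_seen = {}
--     new_seen = set()
--     i = start
--     count = 0
--     if chrom not in seen:
--         return new_seen
--     while i < end:
--         if i in seen[chrom]:
--             new_seen = new_seen.union(seen[chrom][i])
--             count += 1
--         i += 1
--     return new_seen
-- ===== SOURCE B (Python) =====
-- def get_seen_nearby(chrom, start, end, seen):
--     # Three staged passes over the keys actually present: filter to the interval,
--     # sort, then flatten their value lists and deduplicate in first-occurrence order.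
--     if chrom not in seen:
--         return set()
--     inner = seen[chrom]
--     keys = sorted(k for k in inner if start <= k < end)
--     flat = []
--     for k in keys:
--         flat.extend(inner[k])
--     return set(flat)
-- ===== Notes on version B (the rewrite author's own statement) =====
-- stated objective: alternative
-- what changed: B never scans the integer interval: it filters the keys actually present in seen[chrom] to [start,end), sorts them, concatenates their value lists and takes set() of the flat list, instead of A's while-loop testing every integer i in [start,end) against the dict and unioning sets incrementally; O(m log m) over the m dict keys versus O(end-start).
import Mathlib
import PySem

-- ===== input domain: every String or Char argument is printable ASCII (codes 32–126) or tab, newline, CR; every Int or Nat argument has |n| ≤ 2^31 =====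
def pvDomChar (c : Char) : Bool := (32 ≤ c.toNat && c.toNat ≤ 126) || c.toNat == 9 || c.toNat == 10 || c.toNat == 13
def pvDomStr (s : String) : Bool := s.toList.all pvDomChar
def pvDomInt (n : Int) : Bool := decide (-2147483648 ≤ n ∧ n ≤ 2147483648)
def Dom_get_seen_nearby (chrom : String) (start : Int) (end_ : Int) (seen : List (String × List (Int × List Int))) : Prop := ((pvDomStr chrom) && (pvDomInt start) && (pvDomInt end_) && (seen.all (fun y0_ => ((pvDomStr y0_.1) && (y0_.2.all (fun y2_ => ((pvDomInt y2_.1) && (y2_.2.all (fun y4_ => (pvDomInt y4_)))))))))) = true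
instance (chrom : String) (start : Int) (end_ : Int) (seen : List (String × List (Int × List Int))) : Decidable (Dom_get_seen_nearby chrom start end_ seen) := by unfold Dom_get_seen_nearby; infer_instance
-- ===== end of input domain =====

-- B replaces A's while-loop over every integer i in [start,end) by staged passes over the keys
-- actually present in seen[chrom] (filter to the interval, sort, flatten value lists, set());
-- a different traversal of the same data, same value.

-- ===== PORT A =====
-- A's dict lookup d[k] (first match on the association list), used only by port A
def pvGetD (xs : List (Int × List Int)) (k : Int) : List Int :=
  match xs.find? (fun p => p.1 == k) with
  | some p => p.2
  | none => []

-- literal port: new_seen = set(); if chrom not in seen: return it; while i < end, if i is a key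
-- of seen[chrom], union its value list into new_seen and bump the (dead) counter.
def get_seen_nearby (chrom : String) (start : Int) (end_ : Int) (seen : List (String × List (Int × List Int))) : List Int :=
  let new_seen : PySem.Set Int := PySem.Set.empty
  if !(seen.any (fun p => p.1 == chrom)) then new_seen
  else
    let inner :=
      match seen.find? (fun p => p.1 == chrom) with
      | some p => p.2
      | none => []
    ((PySem.List.pyRange start end_ 1).foldl
      (fun st i =>
        if inner.any (fun q => q.1 == i) then
          (PySem.Set.union st.1 (pvGetD inner i), st.2 + 1)
        else st)
      (new_seen, (0 : Int))).1

-- ===== PORT B =====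
-- port of Source B: if chrom not in seen: return set(); keys = sorted(k for k in inner if
-- start <= k < end) ('for k in inner' = the dict's keys, i.e. first occurrences of the first
-- components = PySem.List.dedup); flat extends inner[k] for each; return set(flat).
def get_seen_nearby_alt (chrom : String) (start : Int) (end_ : Int) (seen : List (String × List (Int × List Int))) : List Int :=
  match seen.find? (fun p => p.1 == chrom) with
  | none => PySem.Set.empty
  | some pr =>
    let inner := pr.2
    let keys := PySem.List.sorted
      ((PySem.List.dedup (inner.map Prod.fst)).filter (fun k => decide (start ≤ k ∧ k < end_)))
      (fun k => k) false
    let flat := keys.foldl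
      (fun acc k => acc ++
        (match inner.find? (fun q => q.1 == k) with
         | some q => q.2
         | none => []))
      []
    PySem.Set.ofList flat

-- ===== PRECONDITION & SPEC =====
def Spec_get_seen_nearby (chrom : String) (start : Int) (end_ : Int) (seen : List (String × List (Int × List Int))) (out : List Int) : Prop := out = get_seen_nearby_alt chrom start end_ seen
instance (chrom : String) (start : Int) (end_ : Int) (seen : List (String × List (Int × List Int))) (out : List Int) : Decidable (Spec_get_seen_nearby chrom start end_ seen out) := by unfold Spec_get_seen_nearby; infer_instance

-- ===== CLAIM =====
def Claim_equal_get_seen_nearby : Prop := ∀ (chrom : String) (start : Int) (end_ : Int) (seen : List (String × List (Int × List Int))), Dom_get_seen_nearby chrom start end_ seen → Spec_get_seen_nearby chrom start end_ seen (get_seen_nearby chrom start end_ seen)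

-- ===== LEMMAS AND PROOFS =====

-- A's loop over a pair state (set, dead counter): the first component is the plain set loop
theorem pvFst_foldl (inner : List (Int × List Int)) (l : List Int) (s : PySem.Set Int) (c : Int) :
    (l.foldl
      (fun st i =>
        if inner.any (fun q => q.1 == i) then
          (PySem.Set.union st.1 (pvGetD inner i), st.2 + 1)
        else st)
      (s, c)).1
    = l.foldl
        (fun s i =>
          if inner.any (fun q => q.1 == i) then PySem.Set.union s (pvGetD inner i) else s)
        s := by
  induction l generalizing s c with
  | nil => rfl
  | cons x t ih =>
    simp only [List.foldl_cons]
    by_cases h : inner.any (fun q => q.1 == x) <;> simp [h, ih]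

-- a fold of set-unions from s is one update by the flattened value lists
theorem pvFoldl_union_eq_update (g : Int → List Int) (l : List Int) (s : PySem.Set Int) :
    l.foldl (fun s k => PySem.Set.union s (g k)) s = PySem.Set.update s (l.flatMap g) := by
  induction l generalizing s with
  | nil => simp [pysem]
  | cons x t ih =>
    rw [List.foldl_cons, ih, List.flatMap_cons, PySem.Set.update_append]
    rfl

theorem pvPyRange_pairwise (a b : Int) : List.Pairwise (· < ·) (PySem.List.pyRange a b 1) := by
  rw [PySem.List.pyRange_of_pos a b (by norm_num)]
  refine List.pairwise_map.mpr (List.pairwise_lt_range.imp ?_)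
  intro i j h
  omega

-- the two traversal orders visit exactly the same key list
theorem pvKeylists (inner : List (Int × List Int)) (a b : Int) :
    (PySem.List.pyRange a b 1).filter (fun i => inner.any (fun q => q.1 == i))
    = PySem.List.sorted
        ((PySem.List.dedup (inner.map Prod.fst)).filter (fun k => decide (a ≤ k ∧ k < b)))
        (fun k => k) false := by
  set R := (PySem.List.pyRange a b 1).filter (fun i => inner.any (fun q => q.1 == i)) with hR
  set F := (PySem.List.dedup (inner.map Prod.fst)).filter (fun k => decide (a ≤ k ∧ k < b)) with hF
  have hRp : List.Pairwise (· < ·) R := (pvPyRange_pairwise a b).filter _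
  have hmem : ∀ x : Int, x ∈ F ↔ x ∈ R := by
    intro x
    have ha : (inner.any (fun q => q.1 == x)) = true ↔ x ∈ inner.map Prod.fst := by
      simp only [List.any_eq_true, List.mem_map, beq_iff_eq]
    rw [hF, hR]
    simp only [List.mem_filter, PySem.List.mem_pyRange_one, PySem.List.mem_dedup,
      decide_eq_true_eq, ha]
    tauto
  have hFnd : F.Nodup := (PySem.List.nodup_dedup (inner.map Prod.fst)).filter _
  have hperm : R.Perm F :=
    (List.perm_ext_iff_of_nodup (hRp.imp Int.ne_of_lt) hFnd).mpr (fun x => ((hmem x).symm))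
  exact (PySem.List.sorted_eq_of_perm_of_pairwise_lt F R (fun k => k) hperm hRp).symm

-- ===== VERDICT =====
theorem get_seen_nearby_spec : Claim_equal_get_seen_nearby := by
  intro chrom start end_ seen _hdom
  unfold Spec_get_seen_nearby get_seen_nearby get_seen_nearby_alt
  by_cases hc : seen.any (fun p => p.1 == chrom)
  · obtain ⟨pr, hfind⟩ := Option.isSome_iff_exists.mp
      (List.find?_isSome.mpr (List.any_eq_true.mp hc))
    simp only [hc, Bool.not_true, Bool.false_eq_true, if_false, hfind]
    rw [pvFst_foldl, PySem.List.foldl_if_eq_foldl_filter, pvKeylists pr.2 start end_,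
      pvFoldl_union_eq_update]
    rw [PySem.List.foldl_append_eq_flatMap, List.nil_append]
    rfl
  · have : seen.find? (fun p => p.1 == chrom) = none := by
      rw [List.find?_eq_none]
      intro x hx
      simp only [List.any_eq_true] at hc
      exact fun h => hc ⟨x, hx, h⟩
    simp [hc, this]
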